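-- pv_equiv track=rewrite | github.com/zzarbttoo/TMT | CH/20200716_4_1.py | solution
-- ===== SOURCE A (Python) =====
-- from collections import deque as dq
--
-- def solution(arr):
--     cnt=0
--     answer=0
--     stack=''
--     arr=dq(arr)
--     while arr:
--         stack+=arr.popleft()
--         if stack.endswith('()'):
--             cnt-=1
--             answer+=cnt
--             continue
--         elif stack[-1]=='(':
--             cnt+=1
--             continue
--         elif stack[-1]==')':
--             cnt-=1
--             if stack[-2]==')':
--                 answer+=1
--         if stack.count('(')==stack.count(')'):
--             cnt=0
--             stack=''
--     return answer
-- ===== SOURCE B (Python) =====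
-- def solution(arr):
--     # Score = sum over adjacent pairs: a "()" pair scores the prefix paren balance
--     # at its close, a ")" right after another ")" scores 1. Single O(n) pass over
--     # consecutive character pairs; no stack string, no segment resets.
--     answer = 0
--     bal = 0
--     if arr:
--         bal = (arr[0] == '(') - (arr[0] == ')')
--     for prev, c in zip(arr, arr[1:]):
--         bal += (c == '(') - (c == ')')
--         if c == ')':
--             if prev == '(':
--                 answer += bal
--             elif prev == ')':
--                 answer += 1
--     return answer
-- ===== Notes on version B (the rewrite author's own statement) =====
-- stated objective: faster
-- what changed: B discards A's growing stack string, segment resets and per-step rescans (endswith/[-1]/[-2]/two .count calls) and instead computes the answer as a single sum over consecutive character pairs zip(arr, arr[1:]) weighted by the running prefix parenthesis balance.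
import Mathlib
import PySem

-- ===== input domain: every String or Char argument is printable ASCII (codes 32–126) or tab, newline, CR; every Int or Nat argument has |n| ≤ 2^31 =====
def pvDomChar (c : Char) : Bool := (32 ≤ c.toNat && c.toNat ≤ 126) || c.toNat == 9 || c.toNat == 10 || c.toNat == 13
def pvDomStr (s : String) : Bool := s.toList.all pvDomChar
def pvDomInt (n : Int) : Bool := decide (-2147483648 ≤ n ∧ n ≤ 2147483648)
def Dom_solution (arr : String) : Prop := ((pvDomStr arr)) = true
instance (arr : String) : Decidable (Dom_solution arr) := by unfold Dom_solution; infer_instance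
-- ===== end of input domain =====

-- B replaces A's stack-string machinery (growing string rescanned by endswith/[-1]/[-2]/count,
-- with segment resets; O(n^2)) by a single O(n) sum over consecutive character pairs weighted
-- by the running prefix parenthesis balance.

-- ===== PORT A =====
-- While loop over dq(arr) popleft, state (stack, cnt, answer); stack is the Python str.
-- `stack[-2]` raises IndexError in Python when the stack has length 1 (excluded by Pre_);
-- the port reads it with default ' ' there, exact on Pre_.
def solutionGo : List Char → List Char → Int → Int → Int
  | _, [], _, answer => answer
  | stack, c :: rest, cnt, answer =>
    let stack' := stack ++ [c]
    if PySem.Chars.endswith stack' ['(', ')'] then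
      solutionGo stack' rest (cnt - 1) (answer + (cnt - 1))
    else if PySem.List.pyGetD stack' (-1) ' ' = '(' then
      solutionGo stack' rest (cnt + 1) answer
    else
      let cnt2 := if PySem.List.pyGetD stack' (-1) ' ' = ')' then cnt - 1 else cnt
      let answer2 := if PySem.List.pyGetD stack' (-1) ' ' = ')' ∧
                        PySem.List.pyGetD stack' (-2) ' ' = ')' then answer + 1 else answer
      if PySem.List.count stack' '(' = PySem.List.count stack' ')' then
        solutionGo [] rest 0 answer2
      else
        solutionGo stack' rest cnt2 answer2

def solution (arr : String) : Int := solutionGo [] arr.toList 0 0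

-- ===== PORT B =====
-- One pass over zip(arr, arr[1:]) with the running prefix balance `bal`.
def solutionAltGo : Int → Int → List (Char × Char) → Int
  | _, answer, [] => answer
  | bal, answer, (prev, c) :: rest =>
    let bal' := bal + (if c = '(' then (1 : Int) else 0) - (if c = ')' then (1 : Int) else 0)
    let answer' := if c = ')' then
        (if prev = '(' then answer + bal' else if prev = ')' then answer + 1 else answer)
      else answer
    solutionAltGo bal' answer' rest

def solution_alt (arr : String) : Int :=
  let l := arr.toList
  let bal0 : Int := match l.head? with
    | some c => (if c = '(' then (1 : Int) else 0) - (if c = ')' then (1 : Int) else 0)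
    | none => 0
  solutionAltGo bal0 0 (l.zip (l.drop 1))

-- ===== PRECONDITION & SPEC =====
-- Pre_ excludes exactly the inputs where A raises IndexError: a closing parenthesis read while
-- A's stack is empty (prefix paren counts equal and the previous step neither pushed an opening
-- parenthesis nor closed a pair).
def PreL (l : List Char) : Prop :=
  ∀ i, i < l.length →
    ¬ (l.getD i ' ' = ')'
       ∧ (l.take i).count '(' = (l.take i).count ')'
       ∧ (i = 0 ∨ l.getD (i - 1) ' ' ≠ '(')
       ∧ (i < 2 ∨ ¬ (l.getD (i - 2) ' ' = '(' ∧ l.getD (i - 1) ' ' = ')')))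
def Pre_solution (arr : String) : Prop := PreL arr.toList
instance (arr : String) : Decidable (Pre_solution arr) := by unfold Pre_solution PreL; infer_instance

def pvWitness_solution : String := "()"

def Spec_solution (arr : String) (out : Int) : Prop := out = solution_alt arr
instance (arr : String) (out : Int) : Decidable (Spec_solution arr out) := by unfold Spec_solution; infer_instance

-- ===== CLAIM (what is proved, stated in full; the proofs are below) =====
def Claim_equal_solution : Prop := ∀ (arr : String), Dom_solution arr → Pre_solution arr → Spec_solution arr (solution arr)

-- ===== LEMMAS AND PROOFS =====

-- proof-side reformulation of B: state (previous char as Option, balance).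
def goB : Option Char → Int → Int → List Char → Int
  | _, _, answer, [] => answer
  | prev, bal, answer, c :: rest =>
    let bal' := bal + (if c = '(' then (1 : Int) else 0) - (if c = ')' then (1 : Int) else 0)
    let answer' := if c = ')' then
        (if prev = some '(' then answer + bal' else if prev = some ')' then answer + 1 else answer)
      else answer
    goB (some c) bal' answer' rest

lemma altGo_zip (rest : List Char) : ∀ (p : Char) (bal answer : Int),
    solutionAltGo bal answer ((p :: rest).zip rest) = goB (some p) bal answer rest := by
  induction rest with
  | nil => intro p bal answer; simp [solutionAltGo, goB]
  | cons c rs ih =>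
    intro p bal answer
    simp only [List.zip_cons_cons, solutionAltGo, ih]
    simp [goB]

lemma alt_eq_goB (arr : String) : solution_alt arr = goB none 0 0 arr.toList := by
  unfold solution_alt
  cases h : arr.toList with
  | nil => simp [solutionAltGo, goB]
  | cons c rest =>
    simp only [List.head?_cons, List.drop_one, List.tail_cons, altGo_zip, goB]
    simp

lemma singleton_prefix_iff {α : Type} (a : α) (l : List α) : [a] <+: l ↔ l.head? = some a := by
  cases l <;> simp [List.cons_prefix_cons, eq_comm]

lemma endswith_append_pair (stack : List Char) (c : Char) :
    PySem.Chars.endswith (stack ++ [c]) ['(', ')'] = true ↔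
      (c = ')' ∧ stack.getLast? = some '(') := by
  rw [PySem.Chars.endswith_iff, ← List.reverse_prefix]
  simp [List.cons_prefix_cons, singleton_prefix_iff, eq_comm]

lemma pyGetD_neg_two_append (stack : List Char) (c : Char) :
    PySem.List.pyGetD (stack ++ [c]) (-2) ' ' = stack.getLast?.getD ' ' := by
  rcases stack.eq_nil_or_concat with rfl | ⟨l, d, rfl⟩
  · simp [PySem.List.pyGetD, PySem.List.pyGet?, PySem.List.pyIdx?]
  · have h : l.concat d ++ [c] = l ++ [d, c] := by simp
    rw [h]
    rw [PySem.List.pyGetD_neg_ofNat (l ++ [d, c]) 2 ' ' (by omega) (by simp)]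
    simp [List.getElem_append_right]

lemma getD_append_len (pre rest : List Char) (c : Char) :
    (pre ++ c :: rest).getD pre.length ' ' = c := by
  simp [List.getD]

lemma getD_append_lt (pre rest : List Char) (k : Nat) (h : k < pre.length) :
    (pre ++ rest).getD k ' ' = pre.getD k ' ' := by
  simp [List.getD, List.getElem?_append_left h]

lemma getD_last (pre : List Char) :
    pre.getD (pre.length - 1) ' ' = pre.getLast?.getD ' ' := by
  rw [List.getLast?_eq_getElem?]
  rfl

lemma getD_penult (pre : List Char) (h : 2 ≤ pre.length) :
    pre.getD (pre.length - 2) ' ' = pre.dropLast.getLast?.getD ' ' := by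
  rw [List.getLast?_eq_getElem?, List.length_dropLast]
  have e : pre.length - 1 - 1 = pre.length - 2 := by omega
  rw [e, List.getElem?_eq_getElem (l := pre.dropLast) (by rw [List.length_dropLast]; omega),
    List.getElem_dropLast]
  simp [List.getD, List.getElem?_eq_getElem (show pre.length - 2 < pre.length by omega)]

-- main induction: A's stack loop equals B's pair loop, given the crash-freedom facts about
-- the already-processed prefix `pre`.
lemma main_go : ∀ (rest pre S : List Char) (p : Option Char) (cnt answer : Int),
    PreL (pre ++ rest) →
    cnt = (S.count '(' : Int) - (S.count ')' : Int) →
    ((S.count '(' : Int) - (S.count ')' : Int)) = ((pre.count '(' : Int) - (pre.count ')' : Int)) →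
    (S ≠ [] → S.getLast? = pre.getLast? ∧ p = pre.getLast?) →
    (S = [] → pre.getLast? ≠ some '(' ∧
        ¬ (pre.dropLast.getLast? = some '(' ∧ pre.getLast? = some ')')) →
    solutionGo S rest cnt answer = goB p cnt answer rest := by
  intro rest
  induction rest with
  | nil => intro pre S p cnt answer _ _ _ _ _; simp [solutionGo, goB]
  | cons c rest ih =>
    intro pre S p cnt answer hP h1 h2 h3 h4
    -- crash-freedom at the current position: if the stack is empty, c is not ')'
    have hnc : S = [] → c ≠ ')' := by
      intro hS hc
      have h4' := h4 hS
      have hcount : pre.count '(' = pre.count ')' := by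
        rw [hS] at h2; simp at h2; omega
      refine hP pre.length (by simp) ⟨?_, ?_, ?_, ?_⟩
      · rw [getD_append_len]; exact hc
      · rw [List.take_left]; exact hcount
      · by_cases hpre : pre = []
        · left; simp [hpre]
        · right
          have hlt : pre.length - 1 < pre.length :=
            Nat.sub_lt (List.length_pos_iff.mpr hpre) one_pos
          rw [getD_append_lt _ _ _ hlt, getD_last pre]
          cases hgl : pre.getLast? with
          | none => simp [List.getLast?_eq_none_iff] at hgl; exact absurd hgl hpre
          | some d =>
            simp only [hgl, Option.getD_some]
            intro hd; exact h4'.1 (by rw [hgl, hd])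
      · by_cases hlen : pre.length < 2
        · left; exact hlen
        · right
          rw [Nat.not_lt] at hlen
          have hpre : pre ≠ [] := by intro h; simp [h] at hlen
          have hlt1 : pre.length - 1 < pre.length := by omega
          have hlt2 : pre.length - 2 < pre.length := by omega
          rw [getD_append_lt _ _ _ hlt2, getD_append_lt _ _ _ hlt1,
            getD_last pre, getD_penult pre hlen]
          rintro ⟨ha, hb⟩
          refine h4'.2 ⟨?_, ?_⟩
          · cases hdl : pre.dropLast.getLast? with
            | none => rw [hdl] at ha; exact absurd ha (by decide)
            | some d => rw [hdl] at ha; simp only [Option.getD_some] at ha; rw [ha]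
          · cases hgl : pre.getLast? with
            | none => rw [List.getLast?_eq_none_iff] at hgl; exact absurd hgl hpre
            | some d => rw [hgl] at hb; simp only [Option.getD_some] at hb; rw [hb]
    have hPnext : PreL ((pre ++ [c]) ++ rest) := by simpa using hP
    simp only [solutionGo, goB]
    by_cases hEnd : c = ')' ∧ S.getLast? = some '('
    · -- "()" just closed
      obtain ⟨hc, hS⟩ := hEnd
      have hSne : S ≠ [] := by intro h; rw [h] at hS; simp at hS
      obtain ⟨h3a, h3b⟩ := h3 hSne
      rw [if_pos ((endswith_append_pair S c).mpr ⟨hc, hS⟩)]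
      rw [ih (pre ++ [c]) (S ++ [c]) (some c) _ _ hPnext
          (by subst hc; simp [List.count_append, PySem.List.count]; push_cast; omega)
          (by subst hc; simp [List.count_append]; push_cast; omega)
          (by intro _; simp)
          (by intro h; simp at h)]
      have hp : p = some '(' := by rw [h3b, ← h3a, hS]
      subst hc
      simp [hp]
    · rw [if_neg (by rw [endswith_append_pair]; exact hEnd)]
      rw [PySem.List.pyGetD_neg_one_append_singleton]
      by_cases hc : c = '('
      · -- push '('
        rw [if_pos hc]
        rw [ih (pre ++ [c]) (S ++ [c]) (some c) _ _ hPnext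
            (by subst hc; simp [List.count_append]; push_cast; omega)
            (by subst hc; simp [List.count_append]; push_cast; omega)
            (by intro _; simp)
            (by intro h; simp at h)]
        subst hc; simp
      · rw [if_neg hc]
        rw [pyGetD_neg_two_append]
        by_cases hcr : c = ')'
        · -- ')' after a non-'(' character
          have hSne : S ≠ [] := fun h => hnc h hcr
          obtain ⟨h3a, h3b⟩ := h3 hSne
          cases hgl : S.getLast? with
          | none => simp [List.getLast?_eq_none_iff] at hgl; exact absurd hgl hSne
          | some d =>
            have hd : d ≠ '(' := by
              intro h; exact hEnd ⟨hcr, by rw [hgl, h]⟩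
            have hp : p = some d := by rw [h3b, ← h3a, hgl]
            have hcnt : (S ++ [c]).count '(' = (S ++ [c]).count ')' ↔ cnt = 1 := by
              subst hcr; simp [List.count_append]
              constructor
              · intro h; omega
              · intro h
                have : (S.count '(' : Int) = (S.count ')' : Int) + 1 := by omega
                exact_mod_cast this
            by_cases hres : PySem.List.count (S ++ [c]) '(' = PySem.List.count (S ++ [c]) ')'
            · -- reset branch
              have hcnt1 : cnt = 1 := hcnt.mp (by simpa [PySem.List.count_eq] using hres)
              rw [if_pos (by simpa [PySem.List.count_eq] using hres)]
              rw [ih (pre ++ [c]) [] (some c) _ _ hPnext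
                  (by simp)
                  (by subst hcr; simp [List.count_append]; push_cast; omega)
                  (by intro h; exact absurd rfl h)
                  (by intro _; constructor
                      · simp [hcr]
                      · simp
                        intro h
                        exfalso
                        rw [← h3a, hgl] at h
                        exact hd (by simpa using h))]
              subst hcr
              simp [hp, hcnt1]
              by_cases hdr : d = ')' <;> simp [hdr]
            · rw [if_neg hres]
              rw [ih (pre ++ [c]) (S ++ [c]) (some c) _ _ hPnext
                  (by subst hcr; simp [List.count_append]; push_cast; omega)
                  (by subst hcr; simp [List.count_append]; push_cast; omega)
                  (by intro _; simp)
                  (by intro h; simp at h)]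
              subst hcr
              simp [hp, hd]
        · -- a non-parenthesis character
          rw [if_neg hcr]
          have hcnt : (S ++ [c]).count '(' = (S ++ [c]).count ')' ↔ cnt = 0 := by
            simp [List.count_append, hc, hcr]
            constructor
            · intro h; omega
            · intro h
              have : (S.count '(' : Int) = (S.count ')' : Int) := by omega
              exact_mod_cast this
          by_cases hres : PySem.List.count (S ++ [c]) '(' = PySem.List.count (S ++ [c]) ')'
          · have hcnt0 : cnt = 0 := hcnt.mp (by simpa [PySem.List.count_eq] using hres)
            rw [if_pos (by simpa [PySem.List.count_eq] using hres)]
            rw [ih (pre ++ [c]) [] (some c) _ _ hPnext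
                (by simp)
                (by simp [List.count_append, hc, hcr]; omega)
                (by intro h; exact absurd rfl h)
                (by intro _; constructor
                    · simp [hc]
                    · simp [hcr])]
            simp [hcr, hc, hcnt0]
          · rw [if_neg hres]
            rw [ih (pre ++ [c]) (S ++ [c]) (some c) _ _ hPnext
                (by simp [List.count_append, hc, hcr]; omega)
                (by simp [List.count_append, hc, hcr]; omega)
                (by intro _; simp)
                (by intro h; simp at h)]
            simp [hcr, hc]

-- ===== VERDICT (by name: the statement is the Claim_ definition above) =====
theorem solution_spec : Claim_equal_solution := by
  intro arr _ hPre
  unfold Spec_solution solution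
  rw [alt_eq_goB]
  exact main_go arr.toList [] [] none 0 0 (by simpa [Pre_solution] using hPre)
    (by simp) (by simp) (by intro h; exact absurd rfl h)
    (by intro _; simp)
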